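-- pv_equiv track=rewrite | github.com/frederick-wang/algorithm-exercises | luogu/P1229 遍历问题/test.legacy.py | dfs
-- ===== SOURCE A (Python) =====
-- def dfs(pre: str, post: str) -> int:
--     pre_len = len(pre)
--     if pre_len <= 1:
--         return 1
--     left_idx = post.index(pre[1])
--     left_post, right_post = post[:left_idx + 1], post[left_idx + 1:-1]
--     left_pre, right_pre = pre[1:left_idx + 2], pre[left_idx + 2:]
--     left_cnt = dfs(left_pre, left_post)
--     right_cnt = dfs(right_pre, right_post)
--     return 2 * left_cnt * right_cnt if left_idx + 2 == pre_len else left_cnt * right_cnt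
-- ===== SOURCE B (Python) =====
-- def dfs(pre: str, post: str) -> int:
--     # A node has exactly one child iff that child immediately follows it in
--     # preorder and immediately precedes it in postorder; every such node can
--     # swing its child left or right, so the answer is 2 ** (number of them).
--     down = set(zip(post, post[1:]))
--     k = sum((y, x) in down for x, y in zip(pre, pre[1:]))
--     return 2 ** k
-- ===== Notes on version B (the rewrite author's own statement) =====
-- stated objective: alternative
-- what changed: Replaced the recursive divide-and-conquer (which re-slices both strings and re-scans post with .index at every node) by a single linear pass: a node has exactly one child iff that child is adjacent to it in preorder and, reversed, adjacent in postorder, so B counts those pairs against one set built from post and returns 2**count.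
-- outside the precondition, e.g. on dfs('aaa', 'ba'): A returns 2, B returns 1
import Mathlib
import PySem

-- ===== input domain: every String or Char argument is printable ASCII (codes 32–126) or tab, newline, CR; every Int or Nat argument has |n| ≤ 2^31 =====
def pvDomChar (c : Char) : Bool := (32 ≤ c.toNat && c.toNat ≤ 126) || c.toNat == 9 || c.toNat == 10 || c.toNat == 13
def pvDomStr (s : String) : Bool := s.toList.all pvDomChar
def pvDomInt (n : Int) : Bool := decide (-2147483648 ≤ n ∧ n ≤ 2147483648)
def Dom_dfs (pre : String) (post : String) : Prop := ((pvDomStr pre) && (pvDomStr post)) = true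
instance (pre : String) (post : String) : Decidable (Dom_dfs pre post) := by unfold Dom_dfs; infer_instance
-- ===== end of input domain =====

-- ===== PORT A =====
-- B replaces A's recursive divide-and-conquer by one linear adjacent-pair count (objective: alternative).
-- Port of A: the recursion returns `none` exactly where Python's post.index raises ValueError
-- ("substring not found"); the wrapper `dfs` is only claimed (and only tested) under Pre_dfs,
-- where dfsAux is `some`.  Slices with non-negative bounds are ported as take/drop
-- (post[:j+1], post[j+1:-1], pre[1:j+2], pre[j+2:]; exact for 0 <= j).
def dfsAux : List Char → List Char → Option Int
  | [], _ => some 1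
  | [_], _ => some 1
  | _ :: c :: rest, post =>
    match PySem.List.index? post c with
    | none => none
    | some leftIdx =>
      let leftPost := post.take (leftIdx + 1)
      let rightPost := (post.drop (leftIdx + 1)).dropLast
      let leftPre := (c :: rest).take (leftIdx + 1)
      let rightPre := (c :: rest).drop (leftIdx + 1)
      match dfsAux leftPre leftPost, dfsAux rightPre rightPost with
      | some leftCnt, some rightCnt =>
          some (if leftIdx + 2 = rest.length + 2 then 2 * leftCnt * rightCnt
                else leftCnt * rightCnt)
      | _, _ => none
termination_by pre _ => pre.length


def dfs (pre : String) (post : String) : Int :=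
  (dfsAux pre.toList post.toList).getD 0

-- ===== PORT B =====
-- Transliteration of Source B: down = set(zip(post, post[1:])); k = sum((y, x) in down
-- for x, y in zip(pre, pre[1:])); return 2 ** k.
def dfs_alt (pre : String) (post : String) : Int :=
  let preL := pre.toList
  let postL := post.toList
  let down : PySem.Set (Char × Char) := PySem.Set.ofList (postL.zip (postL.drop 1))
  let k : Int := ((preL.zip (preL.drop 1)).map
      (fun xy => if (xy.2, xy.1) ∈ down then (1 : Int) else 0)).sum
  2 ^ k.toNat

-- ===== PRECONDITION & SPEC =====
-- Binary trees with Char labels, and the list of all such trees with a given preorder.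
inductive PVTree where
  | nil : PVTree
  | node : Char → PVTree → PVTree → PVTree
deriving DecidableEq, Repr

def pvPost : PVTree → List Char
  | .nil => []
  | .node c l r => pvPost l ++ pvPost r ++ [c]

def treesWithPreAux : Nat → List Char → List PVTree
  | _, [] => [PVTree.nil]
  | 0, _ :: _ => []
  | fuel + 1, c :: rest =>
    (List.range (rest.length + 1)).flatMap (fun i =>
      (treesWithPreAux fuel (rest.take i)).flatMap (fun l =>
        (treesWithPreAux fuel (rest.drop i)).map (fun r => PVTree.node c l r)))

def treesWithPre (L : List Char) : List PVTree := treesWithPreAux L.length L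

-- Pre_ restricts to the natural domain of the task: pre and post must be the pre- and postorder
-- of one binary tree with pairwise-distinct node labels (plus every input with len(pre) <= 1, on
-- which A is trivially 1).  Outside this domain A may raise ValueError, and where it does return
-- there is no tree count to specify (e.g. ("aaa","ba") is no traversal pair: A gives 2, B gives 1);
-- those inputs are left unclaimed.  treesWithPreAux is a specification-side enumeration of the
-- binary trees whose preorder is the given list (the Nat argument only bounds the structural
-- recursion); neither port enumerates trees, so it re-simulates neither algorithm.
def Pre_dfs (pre : String) (post : String) : Prop :=
  pre.toList.length ≤ 1 ∨
    (pre.toList.Nodup ∧ post.toList ∈ (treesWithPre pre.toList).map pvPost)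

instance (pre : String) (post : String) : Decidable (Pre_dfs pre post) := by
  unfold Pre_dfs; infer_instance

def pvWitness_dfs : String × String := ("ab", "ba")

def Spec_dfs (pre : String) (post : String) (out : Int) : Prop := out = dfs_alt pre post
instance (pre : String) (post : String) (out : Int) : Decidable (Spec_dfs pre post out) := by
  unfold Spec_dfs; infer_instance

-- ===== CLAIM (what is proved, stated in full; the proofs are below) =====
def Claim_equal_dfs : Prop := ∀ (pre : String) (post : String),
  Dom_dfs pre post → Pre_dfs pre post → Spec_dfs pre post (dfs pre post)

-- ===== LEMMAS AND PROOFS =====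

def pvPre : PVTree → List Char
  | .nil => []
  | .node c l r => c :: (pvPre l ++ pvPre r)

lemma pvPost_perm_pvPre (t : PVTree) : (pvPost t).Perm (pvPre t) := by
  induction t with
  | nil => simp [pvPost, pvPre]
  | node c l r ihl ihr =>
    simp only [pvPost, pvPre]
    exact (List.perm_append_singleton c (pvPost l ++ pvPost r)).trans
      (List.Perm.cons c (List.Perm.append ihl ihr))

lemma pvPre_eq_nil_iff (t : PVTree) : pvPre t = [] ↔ t = PVTree.nil := by
  cases t <;> simp [pvPre]

lemma pvPre_mem_treesWithPreAux : ∀ (n : Nat) {L : List Char} {t : PVTree},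
    L.length ≤ n → t ∈ treesWithPreAux n L → pvPre t = L := by
  intro n
  induction n with
  | zero =>
    intro L t hlen ht
    match L, hlen with
    | [], _ => simp [treesWithPreAux] at ht; simp [ht, pvPre]
  | succ n ih =>
    intro L t hlen ht
    match L with
    | [] => simp [treesWithPreAux] at ht; simp [ht, pvPre]
    | c :: rest =>
      simp only [treesWithPreAux, List.mem_flatMap, List.mem_map, List.mem_range] at ht
      obtain ⟨i, hi, l, hl, r, hr, rfl⟩ := ht
      have hlen' : rest.length ≤ n := by simpa using hlen
      have h1 := ih (L := rest.take i) (by simp; omega) hl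
      have h2 := ih (L := rest.drop i) (by simp; omega) hr
      simp [pvPre, h1, h2]

lemma pvPre_mem_treesWithPre {L : List Char} {t : PVTree} (h : t ∈ treesWithPre L) :
    pvPre t = L :=
  pvPre_mem_treesWithPreAux L.length (Nat.le_refl _) h

def pvSingles : PVTree → Nat
  | .nil => 0
  | .node _ l r =>
      (if (l = PVTree.nil) ↔ (r = PVTree.nil) then 0 else 1) + pvSingles l + pvSingles r

lemma len_pvPost (t : PVTree) : (pvPost t).length = (pvPre t).length :=
  (pvPost_perm_pvPre t).length_eq

lemma nodup_pvPost {t : PVTree} (h : (pvPre t).Nodup) : (pvPost t).Nodup :=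
  ((pvPost_perm_pvPre t).nodup_iff).2 h

lemma index?_root (d : Char) (l r : PVTree) (suffix : List Char)
    (hnd : (pvPre (PVTree.node d l r)).Nodup) :
    PySem.List.index? (pvPost (PVTree.node d l r) ++ suffix) d
      = some (pvPost l ++ pvPost r).length := by
  have hmem : d ∈ pvPost (PVTree.node d l r) := by
    have : d ∈ pvPre (PVTree.node d l r) := by simp [pvPre]
    exact (pvPost_perm_pvPre _).mem_iff.2 this
  rw [PySem.List.index?_append_of_mem _ hmem]
  have hnd' : (pvPost (PVTree.node d l r)).Nodup := nodup_pvPost hnd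
  simp only [pvPost] at hnd' ⊢
  rw [PySem.List.index?_append_singleton_self]
  intro h
  exact (List.nodup_append.1 hnd').2.2 d h d (by simp) rfl

lemma dfsAux_step (a c : Char) (M post : List Char) (j : Nat)
    (hidx : PySem.List.index? post c = some j) :
    dfsAux (a :: c :: M) post =
      match dfsAux ((c :: M).take (j + 1)) (post.take (j + 1)),
            dfsAux ((c :: M).drop (j + 1)) ((post.drop (j + 1)).dropLast) with
      | some lc, some rc => some (if j + 2 = M.length + 2 then 2 * lc * rc else lc * rc)
      | _, _ => none := by
  conv_lhs => rw [dfsAux, hidx]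

lemma nodup_sub {c : Char} {l r : PVTree}
    (hnd : (pvPre (PVTree.node c l r)).Nodup) : (pvPre l).Nodup ∧ (pvPre r).Nodup := by
  simp only [pvPre, List.nodup_cons, List.nodup_append'] at hnd
  exact ⟨hnd.2.1, hnd.2.2.1⟩

lemma dfsAux_eq (t : PVTree) (hnd : (pvPre t).Nodup) :
    dfsAux (pvPre t) (pvPost t) = some ((2 : Int) ^ pvSingles t) := by
  induction t with
  | nil => simp [pvPre, pvPost, dfsAux, pvSingles]
  | node c l r ihl ihr =>
    have hsub := nodup_sub hnd
    match hl : l, hr : r with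
    | PVTree.nil, PVTree.nil =>
      simp [pvPre, pvPost, dfsAux, pvSingles]
    | PVTree.nil, PVTree.node e rl rr =>
      -- pre = c :: e :: tr,  post = (W ++ [e]) ++ [c]
      have hpre : pvPre (PVTree.node c PVTree.nil (PVTree.node e rl rr))
          = c :: e :: (pvPre rl ++ pvPre rr) := by simp [pvPre]
      have hpost : pvPost (PVTree.node c PVTree.nil (PVTree.node e rl rr))
          = pvPost (PVTree.node e rl rr) ++ [c] := by simp [pvPost]
      set tr := pvPre rl ++ pvPre rr with htr
      set W := pvPost rl ++ pvPost rr with hW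
      have hidx : PySem.List.index? (pvPost (PVTree.node e rl rr) ++ [c]) e = some W.length := by
        exact index?_root e rl rr [c] hsub.2
      have hlen : W.length = tr.length := by
        have := len_pvPost (PVTree.node e rl rr)
        simp [pvPost, pvPre, ← hW, ← htr] at this
        omega
      rw [hpre, hpost, dfsAux_step c e tr _ W.length hidx]
      have h1 : (e :: tr).take (W.length + 1) = e :: tr := by
        rw [hlen]; simp
      have h2 : (pvPost (PVTree.node e rl rr) ++ [c]).take (W.length + 1)
          = pvPost (PVTree.node e rl rr) := by
        apply List.take_left'
        simp [pvPost, ← hW]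
      have h3 : (e :: tr).drop (W.length + 1) = [] := by
        rw [hlen]; simp
      have h4 : (((pvPost (PVTree.node e rl rr) ++ [c]).drop (W.length + 1)).dropLast) = [] := by
        rw [List.drop_left' (by simp [pvPost, ← hW])]
        simp
      rw [h1, h2, h3, h4]
      have ihr' : dfsAux (pvPre (PVTree.node e rl rr)) (pvPost (PVTree.node e rl rr))
          = some ((2:Int) ^ pvSingles (PVTree.node e rl rr)) := by
        exact ihr hsub.2
      have hpre_r : pvPre (PVTree.node e rl rr) = e :: tr := by simp [pvPre, ← htr]
      rw [hpre_r] at ihr'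
      rw [ihr']
      have hdfs0 : dfsAux [] [] = some 1 := by simp [dfsAux]
      rw [hdfs0]
      simp only [hlen]
      simp [pvSingles, mul_comm]
      ring
    | PVTree.node d ll lr, r' =>
      have hpre : pvPre (PVTree.node c (PVTree.node d ll lr) r')
          = c :: d :: ((pvPre ll ++ pvPre lr) ++ pvPre r') := by simp [pvPre]
      have hpost : pvPost (PVTree.node c (PVTree.node d ll lr) r')
          = pvPost (PVTree.node d ll lr) ++ (pvPost r' ++ [c]) := by simp [pvPost]
      set tl := pvPre ll ++ pvPre lr with htl
      set Y := pvPost ll ++ pvPost lr with hY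
      have hidx : PySem.List.index? (pvPost (PVTree.node d ll lr) ++ (pvPost r' ++ [c])) d
          = some Y.length := index?_root d ll lr _ hsub.1
      have hlen : Y.length = tl.length := by
        have := len_pvPost (PVTree.node d ll lr)
        simp [pvPost, pvPre, ← hY, ← htl] at this
        omega
      have hlenQl : (pvPost (PVTree.node d ll lr)).length = Y.length + 1 := by
        simp [pvPost, ← hY]
      rw [hpre, hpost, dfsAux_step c d (tl ++ pvPre r') _ Y.length (by rw [← hpost]; rw [hpost]; exact hidx)]
      have h1 : (d :: (tl ++ pvPre r')).take (Y.length + 1) = d :: tl := by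
        simp only [List.take_succ_cons]
        rw [hlen, List.take_left]
      have h2 : (pvPost (PVTree.node d ll lr) ++ (pvPost r' ++ [c])).take (Y.length + 1)
          = pvPost (PVTree.node d ll lr) := List.take_left' hlenQl
      have h3 : (d :: (tl ++ pvPre r')).drop (Y.length + 1) = pvPre r' := by
        simp only [List.drop_succ_cons]
        rw [hlen, List.drop_left]
      have h4 : ((pvPost (PVTree.node d ll lr) ++ (pvPost r' ++ [c])).drop (Y.length + 1)).dropLast
          = pvPost r' := by
        rw [List.drop_left' hlenQl]
        simp
      rw [h1, h2, h3, h4]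
      have ihl' := ihl hsub.1
      have hpre_l : pvPre (PVTree.node d ll lr) = d :: tl := by simp [pvPre, ← htl]
      rw [hpre_l] at ihl'
      rw [ihl', ihr hsub.2]
      by_cases hrn : r' = PVTree.nil
      · subst hrn
        simp [pvPre, pvSingles, hlen, pow_add, mul_comm]
      · have hPr : pvPre r' ≠ [] := fun h => hrn ((pvPre_eq_nil_iff r').1 h)
        have hlp : 0 < (pvPre r').length := List.length_pos_of_ne_nil hPr
        have hc2 : ¬ (Y.length = tl.length + (pvPre r').length) := by
          rw [hlen]; omega
        simp [pvSingles, hc2, hrn, pow_add]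

def adjP (l : List Char) : List (Char × Char) := l.zip (l.drop 1)

lemma adjP_cons₂ (x y : Char) (L : List Char) :
    adjP (x :: y :: L) = (x, y) :: adjP (y :: L) := rfl

lemma adjP_append' : ∀ (X : List Char) (z w : Char) (W : List Char),
    adjP ((X ++ [z]) ++ w :: W) = adjP (X ++ [z]) ++ (z, w) :: adjP (w :: W)
  | [], z, w, W => by simp [adjP]
  | [x], z, w, W => by simp [adjP]
  | x :: y :: X, z, w, W => by
    have ih := adjP_append' (y :: X) z w W
    simp only [List.cons_append] at ih ⊢
    rw [adjP_cons₂, adjP_cons₂, ih]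
    simp

lemma adjP_append2 (X : List Char) (z : Char) (B : List Char) (hB : B ≠ []) :
    adjP ((X ++ [z]) ++ B) = adjP (X ++ [z]) ++ (z, B.head hB) :: adjP B := by
  cases B with
  | nil => exact absurd rfl hB
  | cons w W => exact adjP_append' X z w W

lemma mem_adjP {u v : Char} {L : List Char} (h : (u, v) ∈ adjP L) : u ∈ L ∧ v ∈ L := by
  have := List.of_mem_zip h
  exact ⟨this.1, List.mem_of_mem_drop this.2⟩

lemma nodup_parts {c : Char} {l r : PVTree}
    (hnd : (pvPre (PVTree.node c l r)).Nodup) :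
    c ∉ pvPre l ∧ c ∉ pvPre r ∧ (pvPre l).Nodup ∧ (pvPre r).Nodup ∧
      ∀ x ∈ pvPre l, x ∉ pvPre r := by
  simp only [pvPre, List.nodup_cons, List.mem_append, List.nodup_append] at hnd
  push Not at hnd
  exact ⟨hnd.1.1, hnd.1.2, hnd.2.1, hnd.2.2.1,
    fun x hx hx' => hnd.2.2.2 x hx x hx' rfl⟩

lemma mem_pvPost_iff (t : PVTree) (x : Char) : x ∈ pvPost t ↔ x ∈ pvPre t :=
  (pvPost_perm_pvPre t).mem_iff

lemma adjP_append_gen : ∀ (A : List Char) (hA : A ≠ []) (w : Char) (W : List Char),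
    adjP (A ++ w :: W) = adjP A ++ (A.getLast hA, w) :: adjP (w :: W)
  | [], h, _, _ => absurd rfl h
  | [x], _, w, W => by simp [adjP]
  | x :: y :: A, _, w, W => by
    have ih := adjP_append_gen (y :: A) (by simp) w W
    simp only [List.cons_append] at ih ⊢
    rw [adjP_cons₂, adjP_cons₂, ih]
    simp [List.getLast]

lemma kcount_eq (t : PVTree) (hnd : (pvPre t).Nodup) :
    (adjP (pvPre t)).countP (fun xy => decide ((xy.2, xy.1) ∈ adjP (pvPost t)))
      = pvSingles t := by
  induction t with
  | nil => simp [pvPre, pvPost, adjP, pvSingles]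
  | node c l r ihl ihr =>
    obtain ⟨hcl, hcr, hndl, hndr, hdisj⟩ := nodup_parts hnd
    match hl : l, hr : r with
    | PVTree.nil, PVTree.nil =>
      simp [pvPre, pvPost, adjP, pvSingles]
    | PVTree.nil, PVTree.node e rl rr =>
      have hpost : pvPost (PVTree.node c PVTree.nil (PVTree.node e rl rr))
          = (pvPost rl ++ pvPost rr ++ [e]) ++ [c] := by simp [pvPost]
      have hpre : pvPre (PVTree.node c PVTree.nil (PVTree.node e rl rr))
          = c :: e :: (pvPre rl ++ pvPre rr) := by simp [pvPre]
      have hadj : adjP ((pvPost rl ++ pvPost rr ++ [e]) ++ [c])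
          = adjP (pvPost (PVTree.node e rl rr)) ++ [(e, c)] := by
        simpa [adjP, pvPost] using adjP_append' (pvPost rl ++ pvPost rr) e c []
      rw [hpre, hpost, hadj]
      have he : pvPre (PVTree.node e rl rr) = e :: (pvPre rl ++ pvPre rr) := by simp [pvPre]
      rw [show (c :: e :: (pvPre rl ++ pvPre rr)) = c :: pvPre (PVTree.node e rl rr) by rw [he]]
      rw [← he] at *
      rw [show adjP (c :: pvPre (PVTree.node e rl rr))
            = (c, e) :: adjP (pvPre (PVTree.node e rl rr)) by rw [he]; rfl]
      rw [List.countP_cons]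
      have hone : (decide ((e, c) ∈ adjP (pvPost (PVTree.node e rl rr)) ++ [(e, c)]))
          = true := by simp
      have hcongr : ∀ xy ∈ adjP (pvPre (PVTree.node e rl rr)),
          (decide ((xy.2, xy.1) ∈ adjP (pvPost (PVTree.node e rl rr)) ++ [(e, c)]) = true)
            ↔ (decide ((xy.2, xy.1) ∈ adjP (pvPost (PVTree.node e rl rr))) = true) := by
        intro xy hxy
        have hx1 : xy.1 ∈ pvPre (PVTree.node e rl rr) :=
          (mem_adjP (u := xy.1) (v := xy.2) (by simpa using hxy)).1
        simp only [decide_eq_true_eq, List.mem_append, List.mem_singleton]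
        constructor
        · rintro (h | h)
          · exact h
          · have : xy.1 = c := congrArg Prod.snd h
            exact absurd (this ▸ hx1) hcr
        · exact Or.inl
      rw [List.countP_congr hcongr, ihr hndr, hone]
      simp [pvSingles]
      omega
    | PVTree.node d ll lr, PVTree.nil =>
      have hpost : pvPost (PVTree.node c (PVTree.node d ll lr) PVTree.nil)
          = (pvPost ll ++ pvPost lr ++ [d]) ++ [c] := by simp [pvPost]
      have hpre : pvPre (PVTree.node c (PVTree.node d ll lr) PVTree.nil)
          = c :: d :: (pvPre ll ++ pvPre lr) := by simp [pvPre]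
      have hadj : adjP ((pvPost ll ++ pvPost lr ++ [d]) ++ [c])
          = adjP (pvPost (PVTree.node d ll lr)) ++ [(d, c)] := by
        simpa [adjP, pvPost] using adjP_append' (pvPost ll ++ pvPost lr) d c []
      rw [hpre, hpost, hadj]
      have he : pvPre (PVTree.node d ll lr) = d :: (pvPre ll ++ pvPre lr) := by simp [pvPre]
      rw [show adjP (c :: d :: (pvPre ll ++ pvPre lr))
            = (c, d) :: adjP (pvPre (PVTree.node d ll lr)) by rw [he]; rfl]
      rw [List.countP_cons]
      have hone : (decide ((d, c) ∈ adjP (pvPost (PVTree.node d ll lr)) ++ [(d, c)]))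
          = true := by simp
      have hcongr : ∀ xy ∈ adjP (pvPre (PVTree.node d ll lr)),
          (decide ((xy.2, xy.1) ∈ adjP (pvPost (PVTree.node d ll lr)) ++ [(d, c)]) = true)
            ↔ (decide ((xy.2, xy.1) ∈ adjP (pvPost (PVTree.node d ll lr))) = true) := by
        intro xy hxy
        have hx1 : xy.1 ∈ pvPre (PVTree.node d ll lr) :=
          (mem_adjP (u := xy.1) (v := xy.2) (by simpa using hxy)).1
        simp only [decide_eq_true_eq, List.mem_append, List.mem_singleton]
        constructor
        · rintro (h | h)
          · exact h
          · have : xy.1 = c := congrArg Prod.snd h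
            exact absurd (this ▸ hx1) hcl
        · exact Or.inl
      rw [List.countP_congr hcongr, ihl hndl, hone]
      simp [pvSingles]
      omega
    | PVTree.node d ll lr, PVTree.node e rl rr =>
      have hPl : pvPre (PVTree.node d ll lr) = d :: (pvPre ll ++ pvPre lr) := by simp [pvPre]
      have hPr : pvPre (PVTree.node e rl rr) = e :: (pvPre rl ++ pvPre rr) := by simp [pvPre]
      have hQl : pvPost (PVTree.node d ll lr) = (pvPost ll ++ pvPost lr) ++ [d] := by
        simp [pvPost]
      have hPlne : pvPre (PVTree.node d ll lr) ≠ [] := by rw [hPl]; simp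
      have hQrne : pvPost (PVTree.node e rl rr) ++ [c] ≠ [] := by simp
      have hdP : d ∈ pvPre (PVTree.node d ll lr) := by rw [hPl]; simp
      have heP : e ∈ pvPre (PVTree.node e rl rr) := by rw [hPr]; simp
      have hlast : (pvPre (PVTree.node d ll lr)).getLast hPlne ∈ pvPre (PVTree.node d ll lr) :=
        List.getLast_mem hPlne
      -- the pre side
      have hA : adjP (pvPre (PVTree.node c (PVTree.node d ll lr) (PVTree.node e rl rr)))
          = (c, d) :: (adjP (pvPre (PVTree.node d ll lr)) ++
              ((pvPre (PVTree.node d ll lr)).getLast hPlne, e) :: adjP (pvPre (PVTree.node e rl rr))) := by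
        have h1 : pvPre (PVTree.node c (PVTree.node d ll lr) (PVTree.node e rl rr))
            = c :: (pvPre (PVTree.node d ll lr) ++ pvPre (PVTree.node e rl rr)) := rfl
        rw [h1]
        have h2 : pvPre (PVTree.node d ll lr) ++ pvPre (PVTree.node e rl rr)
            = d :: ((pvPre ll ++ pvPre lr) ++ pvPre (PVTree.node e rl rr)) := by
          rw [hPl]; simp
        rw [h2, adjP_cons₂, ← h2]
        rw [show pvPre (PVTree.node e rl rr) = e :: (pvPre rl ++ pvPre rr) from hPr]
        rw [adjP_append_gen (pvPre (PVTree.node d ll lr)) hPlne e (pvPre rl ++ pvPre rr), ← hPr]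
      -- the post side
      set w := (pvPost (PVTree.node e rl rr) ++ [c]).head hQrne with hwdef
      have hQrne' : pvPost (PVTree.node e rl rr) ≠ [] := by simp [pvPost]
      have hw : w ∈ pvPost (PVTree.node e rl rr) := by
        rw [hwdef, List.head_append_left hQrne']
        exact List.head_mem hQrne'
      have hadjQr : adjP (pvPost (PVTree.node e rl rr) ++ [c])
          = adjP (pvPost (PVTree.node e rl rr)) ++ [(e, c)] := by
        simpa [adjP, pvPost] using adjP_append' (pvPost rl ++ pvPost rr) e c []
      have hB : adjP (pvPost (PVTree.node c (PVTree.node d ll lr) (PVTree.node e rl rr)))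
          = adjP (pvPost (PVTree.node d ll lr)) ++
              (d, w) :: (adjP (pvPost (PVTree.node e rl rr)) ++ [(e, c)]) := by
        have h1 : pvPost (PVTree.node c (PVTree.node d ll lr) (PVTree.node e rl rr))
            = ((pvPost ll ++ pvPost lr) ++ [d]) ++ (pvPost (PVTree.node e rl rr) ++ [c]) := by
          simp [pvPost]
        rw [h1, adjP_append2 _ _ _ hQrne, ← hQl, hadjQr]
      rw [hA, hB, List.countP_cons, List.countP_append, List.countP_cons]
      -- membership transfer
      have hmQl : ∀ x : Char, x ∈ pvPost (PVTree.node d ll lr) ↔ x ∈ pvPre (PVTree.node d ll lr) :=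
        mem_pvPost_iff _
      have hmQr : ∀ x : Char, x ∈ pvPost (PVTree.node e rl rr) ↔ x ∈ pvPre (PVTree.node e rl rr) :=
        mem_pvPost_iff _
      have hwP : w ∈ pvPre (PVTree.node e rl rr) := (hmQr w).1 hw
      have hde : d ≠ e := fun h => hdisj d hdP (h ▸ heP)
      -- the two boundary pairs contribute nothing
      have hz1 : (decide ((d, c) ∈ adjP (pvPost (PVTree.node d ll lr)) ++
          (d, w) :: (adjP (pvPost (PVTree.node e rl rr)) ++ [(e, c)]))) = false := by
        simp only [decide_eq_false_iff_not, List.mem_append, List.mem_cons, List.not_mem_nil,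
          or_false]
        rintro (h | h | h | h)
        · exact hcl ((hmQl c).1 (mem_adjP h).2)
        · have heq : c = w := congrArg Prod.snd h
          exact hcr (heq ▸ hwP)
        · exact hdisj d hdP ((hmQr d).1 (mem_adjP h).1)
        · exact hde (congrArg Prod.fst h)
      have hz2 : (decide ((e, (pvPre (PVTree.node d ll lr)).getLast hPlne) ∈
          adjP (pvPost (PVTree.node d ll lr)) ++
          (d, w) :: (adjP (pvPost (PVTree.node e rl rr)) ++ [(e, c)]))) = false := by
        simp only [decide_eq_false_iff_not, List.mem_append, List.mem_cons, List.not_mem_nil,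
          or_false]
        rintro (h | h | h | h)
        · exact hdisj e ((hmQl e).1 (mem_adjP h).1) heP
        · exact hde (congrArg Prod.fst h).symm
        · exact hdisj _ hlast ((hmQr _).1 (mem_adjP h).2)
        · have heq : (pvPre (PVTree.node d ll lr)).getLast hPlne = c := congrArg Prod.snd h
          exact hcl (heq ▸ hlast)
      -- internal pairs reduce to the subtrees
      have hcongrL : ∀ xy ∈ adjP (pvPre (PVTree.node d ll lr)),
          (decide ((xy.2, xy.1) ∈ adjP (pvPost (PVTree.node d ll lr)) ++
            (d, w) :: (adjP (pvPost (PVTree.node e rl rr)) ++ [(e, c)])) = true)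
          ↔ (decide ((xy.2, xy.1) ∈ adjP (pvPost (PVTree.node d ll lr))) = true) := by
        intro xy hxy
        have hx := mem_adjP (u := xy.1) (v := xy.2) (by simpa using hxy)
        simp only [decide_eq_true_eq, List.mem_append, List.mem_cons, List.not_mem_nil,
          or_false]
        constructor
        · rintro (h | h | h | h)
          · exact h
          · have heq : xy.1 = w := congrArg Prod.snd h
            exact absurd (heq ▸ hx.1) (fun hh => hdisj _ hh hwP)
          · exact absurd ((hmQr _).1 (mem_adjP h).1) (hdisj _ hx.2)
          · have heq : xy.2 = e := congrArg Prod.fst h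
            exact absurd (heq ▸ hx.2) (fun hh => hdisj _ hh heP)
        · exact fun h => Or.inl h
      have hcongrR : ∀ xy ∈ adjP (pvPre (PVTree.node e rl rr)),
          (decide ((xy.2, xy.1) ∈ adjP (pvPost (PVTree.node d ll lr)) ++
            (d, w) :: (adjP (pvPost (PVTree.node e rl rr)) ++ [(e, c)])) = true)
          ↔ (decide ((xy.2, xy.1) ∈ adjP (pvPost (PVTree.node e rl rr))) = true) := by
        intro xy hxy
        have hx := mem_adjP (u := xy.1) (v := xy.2) (by simpa using hxy)
        simp only [decide_eq_true_eq, List.mem_append, List.mem_cons, List.not_mem_nil,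
          or_false]
        constructor
        · rintro (h | h | h | h)
          · exact absurd ((hmQl _).1 (mem_adjP h).1) (fun hh => hdisj _ hh hx.2)
          · have heq : xy.2 = d := congrArg Prod.fst h
            exact absurd (heq ▸ hx.2) (fun hh => hdisj _ (heq ▸ hdP) hh)
          · exact h
          · have heq : xy.1 = c := congrArg Prod.snd h
            exact absurd (heq ▸ hx.1) hcr
        · exact fun h => Or.inr (Or.inr (Or.inl h))
      rw [List.countP_congr hcongrL, List.countP_congr hcongrR, ihl hndl, ihr hndr, hz1, hz2]
      simp [pvSingles]

lemma dfs_alt_eq (pre post : String) :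
    dfs_alt pre post = 2 ^ ((adjP pre.toList).countP
      (fun xy => decide ((xy.2, xy.1) ∈ adjP post.toList))) := by
  unfold dfs_alt adjP
  have hmem : ∀ xy : Char × Char,
      (xy.2, xy.1) ∈ PySem.Set.ofList (post.toList.zip (post.toList.drop 1))
        ↔ (xy.2, xy.1) ∈ post.toList.zip (post.toList.drop 1) :=
    fun xy => PySem.Set.mem_ofList _ _
  simp only [hmem]
  have hrw : (List.map (fun xy : Char × Char =>
        if (xy.2, xy.1) ∈ post.toList.zip (post.toList.drop 1) then (1 : Int) else 0)
        (pre.toList.zip (pre.toList.drop 1))).sum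
      = ((pre.toList.zip (pre.toList.drop 1)).countP
          (fun xy => decide ((xy.2, xy.1) ∈ post.toList.zip (post.toList.drop 1))) : Int) := by
    rw [← PySem.List.sum_map_ite_one_zero]
    simp
  rw [hrw]
  simp

lemma dfs_eq_alt (pre post : String) (hP : Pre_dfs pre post) :
    dfs pre post = dfs_alt pre post := by
  rcases hP with hshort | ⟨hnd, hmem⟩
  · unfold dfs
    rw [dfs_alt_eq]
    match hL : pre.toList, hshort with
    | [], _ => simp [dfsAux, adjP]
    | [x], _ => simp [dfsAux, adjP]
  · rw [List.mem_map] at hmem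
    obtain ⟨t, htmem, hpost⟩ := hmem
    have hpreL : pvPre t = pre.toList := pvPre_mem_treesWithPre htmem
    have hnd' : (pvPre t).Nodup := hpreL ▸ hnd
    unfold dfs
    rw [dfs_alt_eq, ← hpreL, ← hpost, dfsAux_eq t hnd', kcount_eq t hnd']
    rfl

-- ===== VERDICT (by name: the statement is the Claim_ definition above) =====
theorem dfs_spec : Claim_equal_dfs := by
  intro pre post _ hP
  unfold Spec_dfs
  exact dfs_eq_alt pre post hP
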